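-- pv_equiv track=rewrite | github.com/mohammadfaiizan/ProjectI | DSA/Problem/Dynamic Programming/02_Grid_Matrix_DP/1277_Count_Square_Submatrices_with_All_Ones.py | count_squares_all_positions
-- ===== SOURCE A (Python) =====
-- def count_squares_all_positions(matrix):
--     """
--     FIND ALL SQUARE POSITIONS:
--     ==========================
--     Return count and all square positions by size.
--
--     Time Complexity: O(m*n*total_squares) - DP + enumeration
--     Space Complexity: O(m*n + total_squares) - DP table + positions
--     """
--     if not matrix or not matrix[0]:
--         return 0, {}
--
--     m, n = len(matrix), len(matrix[0])
--
--     dp = [[0] * n for _ in range(m)]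
--     squares_by_size = {}
--     total_count = 0
--
--     for i in range(m):
--         for j in range(n):
--             if matrix[i][j] == 1:
--                 if i == 0 or j == 0:
--                     dp[i][j] = 1
--                 else:
--                     dp[i][j] = min(dp[i-1][j], dp[i][j-1], dp[i-1][j-1]) + 1
--
--                 # Record all squares ending at this position
--                 max_size = dp[i][j]
--                 for size in range(1, max_size + 1):
--                     if size not in squares_by_size:
--                         squares_by_size[size] = []
--
--                     # Calculate top-left corner
--                     top_left = (i - size + 1, j - size + 1)
--                     bottom_right = (i, j)
--                     squares_by_size[size].append((top_left, bottom_right))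
--                     total_count += 1
--
--     return total_count, squares_by_size
-- ===== SOURCE B (Python) =====
-- def count_squares_all_positions(matrix):
--     """Same result via a two-phase algorithm: build the full dp table first,
--     then emit positions size by size with whole-grid scans."""
--     if not matrix or not matrix[0]:
--         return 0, {}
--
--     n = len(matrix[0])
--     dp = []
--     prev = [0] * n
--     for row in matrix:
--         cur = []
--         for j in range(n):
--             if row[j] == 1:
--                 if not dp or j == 0:
--                     cur.append(1)
--                 else:
--                     cur.append(1 + min(prev[j], cur[j - 1], prev[j - 1]))
--             else:
--                 cur.append(0)
--         dp.append(cur)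
--         prev = cur
--
--     total_count = sum(sum(r) for r in dp)
--     gmax = max(max(r) for r in dp)
--
--     squares_by_size = {}
--     for s in range(1, gmax + 1):
--         squares_by_size[s] = [((i - s + 1, j - s + 1), (i, j))
--                               for i in range(len(dp))
--                               for j in range(n)
--                               if dp[i][j] >= s]
--     return total_count, squares_by_size
-- ===== Notes on version B (the rewrite author's own statement) =====
-- stated objective: alternative
-- what changed: B first builds the whole dp table with a rolling previous row, computes the total as the sum of all dp values and the maximum square size as the table maximum, and then builds squares_by_size with one whole-grid scan per size s (collecting cells with dp[i][j] >= s), instead of A's single pass that enumerates all sizes 1..dp[i][j] inside the per-cell loop while mutating the dict and counter.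
import Mathlib
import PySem

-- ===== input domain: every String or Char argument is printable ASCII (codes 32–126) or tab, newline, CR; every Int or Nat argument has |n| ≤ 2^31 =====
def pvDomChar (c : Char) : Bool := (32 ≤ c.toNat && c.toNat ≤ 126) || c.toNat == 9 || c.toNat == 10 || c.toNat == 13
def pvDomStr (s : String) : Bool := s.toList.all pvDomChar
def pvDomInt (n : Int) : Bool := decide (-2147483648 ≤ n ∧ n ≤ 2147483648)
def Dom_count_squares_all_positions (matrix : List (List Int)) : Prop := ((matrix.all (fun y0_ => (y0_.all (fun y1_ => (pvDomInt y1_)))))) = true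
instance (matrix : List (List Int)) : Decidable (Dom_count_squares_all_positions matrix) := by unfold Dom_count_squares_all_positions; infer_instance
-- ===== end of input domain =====

-- B re-derives the same (count, positions-by-size) output by a two-phase algorithm (full dp table
-- first, then one whole-grid scan per size) instead of A's per-cell enumeration of all sizes.

-- ===== PORT A =====
-- dp[i][j] = v : loop indices are in-range and nonnegative here, where Python list assignment is List.set
def pvSetCell (dp : List (List Int)) (i j : Int) (v : Int) : List (List Int) :=
  dp.set i.toNat ((dp.getD i.toNat []).set j.toNat v)

-- body of A's inner 'for size in range(1, max_size + 1)' loop (dict update + total_count += 1)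
def pvAsize (i j : Int)
    (dt : PySem.Dict Int (List ((Int × Int) × (Int × Int))) × Int) (s : Int) :
    PySem.Dict Int (List ((Int × Int) × (Int × Int))) × Int :=
  let d := if dt.1.contains s then dt.1 else dt.1.insert s []
  let d := d.modify s [] (fun l => l ++ [((i - s + 1, j - s + 1), (i, j))])
  (d, dt.2 + 1)

-- body of A's per-cell work (the 'if matrix[i][j] == 1' block)
def pvAcell (matrix : List (List Int)) (i j : Int)
    (st : List (List Int) × PySem.Dict Int (List ((Int × Int) × (Int × Int))) × Int) :
    List (List Int) × PySem.Dict Int (List ((Int × Int) × (Int × Int))) × Int :=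
  -- matrix[i][j]: indices are in range inside Pre_ (Python raises on ragged rows; excluded by Pre_)
  if PySem.List.pyGetD (PySem.List.pyGetD matrix i []) j 0 == 1 then
    let v : Int :=
      if i == 0 || j == 0 then 1
      else min (min (PySem.List.pyGetD (PySem.List.pyGetD st.1 (i-1) []) j 0)
                    (PySem.List.pyGetD (PySem.List.pyGetD st.1 i []) (j-1) 0))
               (PySem.List.pyGetD (PySem.List.pyGetD st.1 (i-1) []) (j-1) 0) + 1
    let dp := pvSetCell st.1 i j v
    let dt := (PySem.List.pyRange 1 (v+1)).foldl (pvAsize i j) st.2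
    (dp, dt.1, dt.2)
  else st

def count_squares_all_positions (matrix : List (List Int)) : Int × (List (Int × List ((Int × Int) × (Int × Int)))) :=
  if matrix = [] ∨ matrix.headD [] = [] then (0, [])
  else
    let m : Int := (matrix.length : Int)
    let n : Int := ((matrix.headD []).length : Int)
    let st := (PySem.List.pyRange 0 m).foldl (fun st i =>
        (PySem.List.pyRange 0 n).foldl (fun st j => pvAcell matrix i j st) st)
      (List.replicate matrix.length (List.replicate (matrix.headD []).length (0:Int)),
       (PySem.Dict.empty : PySem.Dict Int (List ((Int × Int) × (Int × Int)))), (0:Int))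
    (st.2.2, st.2.1.items)

-- ===== PORT B =====
-- one dp row from the previous row (B's inner 'for j in range(n)' building cur)
def pvBrow (n : Int) (st : List (List Int) × List Int) (row : List Int) : List Int :=
  (PySem.List.pyRange 0 n).foldl (fun cur j =>
    cur ++ [if PySem.List.pyGetD row j 0 == 1 then
              (if st.1.isEmpty || j == 0 then (1:Int)
               else 1 + min (min (PySem.List.pyGetD st.2 j 0)
                                 (PySem.List.pyGetD cur (j-1) 0))
                            (PySem.List.pyGetD st.2 (j-1) 0))
            else 0]) []

-- the size-s comprehension: all positions with dp[i][j] >= s, row-major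
def pvBsizes (dp : List (List Int)) (n s : Int) : List ((Int × Int) × (Int × Int)) :=
  (PySem.List.pyRange 0 (dp.length : Int)).foldl (fun lst i =>
    (PySem.List.pyRange 0 n).foldl (fun lst j =>
      if s ≤ PySem.List.pyGetD (PySem.List.pyGetD dp i []) j 0 then
        lst ++ [((i - s + 1, j - s + 1), (i, j))]
      else lst) lst) []

def count_squares_all_positions_alt (matrix : List (List Int)) : Int × (List (Int × List ((Int × Int) × (Int × Int)))) :=
  if matrix = [] ∨ matrix.headD [] = [] then (0, [])
  else
    let n : Int := ((matrix.headD []).length : Int)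
    let build := matrix.foldl (fun st row =>
        let cur := pvBrow n st row
        (st.1 ++ [cur], cur))
      (([] : List (List Int)), List.replicate (matrix.headD []).length (0:Int))
    let dp := build.1
    let total := (dp.map (fun r => r.sum)).sum
    let gmax := PySem.List.maxD dp.flatten (fun v => v) 0
    let res := (PySem.List.pyRange 1 (gmax+1)).foldl (fun d s => d.insert s (pvBsizes dp n s))
      ((PySem.Dict.empty : PySem.Dict Int (List ((Int × Int) × (Int × Int)))))
    (total, res.items)

-- ===== PRECONDITION & SPEC =====
-- Pre_ excludes exactly the ragged matrices on which Python A raises IndexError: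
-- some row shorter than the first row while the first row is nonempty.
def Pre_count_squares_all_positions (matrix : List (List Int)) : Prop :=
  ∀ row ∈ matrix, (matrix.headD []).length ≤ row.length
instance (matrix : List (List Int)) : Decidable (Pre_count_squares_all_positions matrix) := by
  unfold Pre_count_squares_all_positions; infer_instance
def pvWitness_count_squares_all_positions : List (List Int) := [[1, 1], [1, 1]]

def Spec_count_squares_all_positions (matrix : List (List Int)) (out : Int × (List (Int × List ((Int × Int) × (Int × Int))))) : Prop := out = count_squares_all_positions_alt matrix
instance (matrix : List (List Int)) (out : Int × (List (Int × List ((Int × Int) × (Int × Int))))) : Decidable (Spec_count_squares_all_positions matrix out) := by unfold Spec_count_squares_all_positions; infer_instance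

-- ===== CLAIM (what is proved, stated in full; the proofs are below) =====
def Claim_equal_count_squares_all_positions : Prop := ∀ (matrix : List (List Int)), Dom_count_squares_all_positions matrix → Pre_count_squares_all_positions matrix → Spec_count_squares_all_positions matrix (count_squares_all_positions matrix)

-- ===== LEMMAS AND PROOFS =====

-- matrix[i][j] read with total default (both ports read it the same way inside the loops)
def pvGetM (matrix : List (List Int)) (i j : Nat) : Int := (matrix.getD i []).getD j 0

-- the dp value at cell (i, j): the common mathematical object of both programs
def pvVal (matrix : List (List Int)) : Nat → Nat → Int
  | i, j =>
    if pvGetM matrix i j == 1 then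
      (if i == 0 || j == 0 then (1:Int)
       else min (min (pvVal matrix (i-1) j) (pvVal matrix i (j-1))) (pvVal matrix (i-1) (j-1)) + 1)
    else 0
  termination_by i j => i + j
  decreasing_by all_goals (simp_all; omega)

def pvRowT (matrix : List (List Int)) (n i : Nat) : List Int := (List.range n).map (pvVal matrix i)

def pvTab (matrix : List (List Int)) (m n : Nat) : List (List Int) := (List.range m).map (pvRowT matrix n)

def pvEnt (i j s : Int) : (Int × Int) × (Int × Int) := ((i - s + 1, j - s + 1), (i, j))

def pvEntr (s : Int) (C : List (Int × Int × Int)) : List ((Int × Int) × (Int × Int)) :=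
  (C.filter (fun c => decide (s ≤ c.2.2))).map (fun c => pvEnt c.1 c.2.1 s)

def pvSumv (C : List (Int × Int × Int)) : Int := (C.map (fun c => c.2.2)).sum

def pvVmax (C : List (Int × Int × Int)) : Int := (C.map (fun c => c.2.2)).foldl max 0

def pvSizes (g : Nat) (C : List (Int × Int × Int)) : List (Int × List ((Int × Int) × (Int × Int))) :=
  (List.range g).map (fun (k : Nat) => (((k:Int)+1), pvEntr ((k:Int)+1) C))

def pvDictOf (C : List (Int × Int × Int)) : PySem.Dict Int (List ((Int × Int) × (Int × Int))) :=
  PySem.Dict.mk (pvSizes (pvVmax C).toNat C)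

def pvCellsRow (matrix : List (List Int)) (n i : Nat) : List (Int × Int × Int) :=
  (List.range n).map (fun (j : Nat) => ((i:Int), ((j:Int), pvVal matrix i j)))

def pvCells (matrix : List (List Int)) (m n : Nat) : List (Int × Int × Int) :=
  (List.range m).flatMap (pvCellsRow matrix n)

def pvRowSt (matrix : List (List Int)) (n k j : Nat) : List Int :=
  (List.range j).map (pvVal matrix k) ++ List.replicate (n-j) 0

def pvDpMid (matrix : List (List Int)) (m n k j : Nat) : List (List Int) :=
  (List.range k).map (pvRowT matrix n)
    ++ (pvRowSt matrix n k j :: List.replicate (m-k-1) (List.replicate n 0))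

def pvCellsMid (matrix : List (List Int)) (n k j : Nat) : List (Int × Int × Int) :=
  pvCells matrix k n ++ (List.range j).map (fun (j' : Nat) => ((k:Int), ((j':Int), pvVal matrix k j')))

-- generic invariant lemma for a fold over List.range
theorem pv_foldl_range_state {σ : Type} (f : σ → Nat → σ) (state : Nat → σ) (n : Nat)
    (h : ∀ j, j < n → f (state j) j = state (j+1)) :
    (List.range n).foldl f (state 0) = state n := by
  induction n with
  | zero => rfl
  | succ n ih =>
    rw [List.range_succ, List.foldl_append, ih (fun j hj => h j (by omega))]
    simpa using h n (by omega)

theorem pv_foldl_range_cast_state' {σ : Type} (f : σ → Int → σ) (state : Nat → σ) (n : Nat)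
    (init : σ) (hinit : init = state 0)
    (h : ∀ j, j < n → f (state j) (j:Int) = state (j+1)) :
    ((List.range n).map (fun (k : Nat) => (k : Int))).foldl f init = state n := by
  rw [hinit, List.foldl_map]
  exact pv_foldl_range_state _ _ n h

theorem pv_range_one_cast (v : Nat) :
    PySem.List.pyRange 1 ((v:Int)+1) = (List.range v).map (fun (k : Nat) => ((k:Int)+1)) := by
  induction v with
  | zero => rfl
  | succ v ih =>
    rw [List.range_succ, List.map_append, ← ih]
    have : ((v:Int)+1)+1 = ((v+1:Nat):Int)+1 := by push_cast; ring
    rw [← this, PySem.List.pyRange_one_succ_right (by omega)]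
    simp

theorem pvVal_nonneg (matrix : List (List Int)) (i j : Nat) : 0 ≤ pvVal matrix i j := by
  induction i, j using pvVal.induct matrix with
  | case1 i j h hz => rw [pvVal]; simp_all
  | case2 i j h hz h1 h2 h3 => rw [pvVal]; simp_all; omega
  | case3 i j h => rw [pvVal]; simp_all

theorem pvVal_of_ne_one (matrix : List (List Int)) (i j : Nat) (h : ¬ pvGetM matrix i j = 1) :
    pvVal matrix i j = 0 := by
  rw [pvVal]; simp [h]

theorem pvEntr_append (s : Int) (C C' : List (Int × Int × Int)) :
    pvEntr s (C ++ C') = pvEntr s C ++ pvEntr s C' := by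
  simp [pvEntr]

theorem pvVmax_nonneg (C : List (Int × Int × Int)) : 0 ≤ pvVmax C := by
  exact (PySem.List.le_foldl_max (C.map (fun c => c.2.2)) 0).1

theorem pvVmax_bound (C : List (Int × Int × Int)) : ∀ c ∈ C, c.2.2 ≤ pvVmax C := by
  intro c hc
  exact (PySem.List.le_foldl_max (C.map (fun c => c.2.2)) 0).2 _ (List.mem_map_of_mem hc)

theorem pvVmax_append_singleton (C : List (Int × Int × Int)) (c : Int × Int × Int) :
    pvVmax (C ++ [c]) = max (pvVmax C) c.2.2 := by
  simp [pvVmax]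

theorem pvEntr_nil_of_gt (s : Int) (C : List (Int × Int × Int)) (h : ∀ c ∈ C, c.2.2 < s) :
    pvEntr s C = [] := by
  have : C.filter (fun c => decide (s ≤ c.2.2)) = [] := by
    rw [List.filter_eq_nil_iff]
    intro c hc
    simpa using (h c hc)
  simp [pvEntr, this]

theorem pvEntr_singleton (i j s w : Int) :
    pvEntr s [(i, j, w)] = if s ≤ w then [pvEnt i j s] else [] := by
  by_cases h : s ≤ w
  · simp [pvEntr, pvEnt, h]
  · simp [pvEntr, h]

-- the A-side size loop: from the canonical dict for C it produces the canonical dict for C ++ [cell]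
theorem pvAsize_fold (M v : Nat) (C : List (Int × Int × Int)) (i j t : Int)
    (hM : ∀ c ∈ C, c.2.2 ≤ (M:Int)) :
    (PySem.List.pyRange 1 ((v:Int)+1)).foldl (pvAsize i j) (PySem.Dict.mk (pvSizes M C), t)
    = (PySem.Dict.mk ((List.range (M ⊔ v)).map (fun (k : Nat) =>
         (((k:Int)+1), pvEntr ((k:Int)+1) C ++ (if k+1 ≤ v then [pvEnt i j ((k:Int)+1)] else [])))),
       t + (v:Int)) := by
  rw [pv_range_one_cast, List.foldl_map]
  have hstep : ∀ s, s < v →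
      (fun dt (k : Nat) => pvAsize i j dt ((k:Int)+1))
        ((fun (s : Nat) => ((PySem.Dict.mk ((List.range (M ⊔ s)).map (fun (k : Nat) =>
           (((k:Int)+1), pvEntr ((k:Int)+1) C ++ (if k+1 ≤ s then [pvEnt i j ((k:Int)+1)] else []))))),
           t + (s:Int))) s) s
      = ((fun (s : Nat) => ((PySem.Dict.mk ((List.range (M ⊔ s)).map (fun (k : Nat) =>
           (((k:Int)+1), pvEntr ((k:Int)+1) C ++ (if k+1 ≤ s then [pvEnt i j ((k:Int)+1)] else []))))),
           t + (s:Int))) (s+1)) := by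
    intro s hs
    set f : Nat → Nat → (Int × List ((Int × Int) × (Int × Int))) := fun s k =>
        (((k:Int)+1), pvEntr ((k:Int)+1) C ++ (if k+1 ≤ s then [pvEnt i j ((k:Int)+1)] else [])) with hf
    set L : Nat → List (Int × List ((Int × Int) × (Int × Int))) := fun s =>
        (List.range (M ⊔ s)).map (f s) with hL
    have hkeys : ∀ s' : Nat, (PySem.Dict.mk (L s')).keys
        = (List.range (M ⊔ s')).map (fun (k : Nat) => ((k:Int)+1)) := by
      intro s'
      rw [PySem.Dict.keys_mk, hL, List.map_map]
      rfl
    have hinj : ∀ a b : Nat, ((a:Int)+1) = ((b:Int)+1) → a = b := by intro a b hab; omega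
    have hnodup : ∀ s' : Nat, (PySem.Dict.mk (L s')).keys.Nodup := by
      intro s'
      rw [hkeys]
      exact (List.nodup_range).map hinj
    have hcont : ((PySem.Dict.mk (L s)).contains ((s:Int)+1)) = decide (s < M) := by
      rw [PySem.Dict.contains_mk, hL, List.any_map]
      have hfun : ((fun (p : Int × List ((Int × Int) × (Int × Int))) => p.1 == (s:Int)+1) ∘ f s)
          = fun (k : Nat) => k == s := by
        funext k
        simp only [Function.comp, hf]
        apply Bool.eq_iff_iff.mpr
        simp only [beq_iff_eq]
        omega
      rw [hfun]
      apply Bool.eq_iff_iff.mpr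
      simp only [List.any_eq_true, List.mem_range, beq_iff_eq, decide_eq_true_eq]
      constructor
      · rintro ⟨k, hk, rfl⟩; omega
      · intro h; exact ⟨s, by omega, rfl⟩
    show pvAsize i j (PySem.Dict.mk (L s), t + (s:Int)) ((s:Int)+1)
        = (PySem.Dict.mk (L (s+1)), t + ((s+1:Nat):Int))
    by_cases hsM : s < M
    · have hMs : M ⊔ s = M := by omega
      have hMs1 : M ⊔ (s+1) = M := by omega
      have hmem : ((s:Int)+1, pvEntr ((s:Int)+1) C) ∈ L s := by
        rw [hL]
        refine List.mem_map.mpr ⟨s, by simp; omega, ?_⟩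
        simp [hf]
      have hget : (PySem.Dict.mk (L s)).getD ((s:Int)+1) [] = pvEntr ((s:Int)+1) C :=
        PySem.Dict.getD_of_mem_items _ hmem (hnodup s) []
      have hcont' : (PySem.Dict.mk (L s)).contains ((s:Int)+1) = true := by
        rw [hcont]; simpa using hsM
      simp only [pvAsize, hcont', if_true, PySem.Dict.modify, hget]
      have hitems := PySem.Dict.items_insert_of_contains (PySem.Dict.mk (L s))
        (pvEntr ((s:Int)+1) C ++ [((i - ((s:Int)+1) + 1, j - ((s:Int)+1) + 1), (i, j))]) hcont'
      refine Prod.ext ?_ (by push_cast; ring)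
      apply PySem.Dict.ext
      rw [hitems]
      show ((List.range (M ⊔ s)).map (f s)).map _ = (List.range (M ⊔ (s+1))).map (f (s+1))
      rw [List.map_map, hMs, hMs1]
      apply List.map_congr_left
      intro k hk
      simp only [List.mem_range] at hk
      by_cases hks : k = s
      · subst hks
        simp [hf, pvEnt, Function.comp]
      · have hne : ¬ (((k:Int)+1) == ((s:Int)+1)) = true := by
          simp only [beq_iff_eq]
          omega
        simp only [Function.comp, hf, hne, if_false, Bool.false_eq_true]
        by_cases hk1 : k+1 ≤ s
        · rw [if_pos hk1, if_pos (by omega : k+1 ≤ s+1)]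
        · rw [if_neg hk1, if_neg (by omega : ¬ k+1 ≤ s+1)]
    · have hMs : M ⊔ s = s := by omega
      have hMs1 : M ⊔ (s+1) = s+1 := by omega
      have hcont' : (PySem.Dict.mk (L s)).contains ((s:Int)+1) = false := by
        rw [hcont]; simpa using hsM
      have hins : (PySem.Dict.mk (L s)).insert ((s:Int)+1) []
          = PySem.Dict.mk (L s ++ [(((s:Int)+1), [])]) :=
        PySem.Dict.ext (PySem.Dict.items_insert_of_not_contains _ _ hcont')
      have hnodup1 : (PySem.Dict.mk (L s ++ [(((s:Int)+1), [])])).keys.Nodup := by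
        rw [PySem.Dict.keys_mk, List.map_append]
        have h1 : (L s).map Prod.fst = (List.range (M ⊔ s)).map (fun (k : Nat) => ((k:Int)+1)) := by
          rw [hL, List.map_map]; rfl
        rw [h1, hMs]
        refine List.Nodup.append ((List.nodup_range).map hinj) (by simp) ?_
        intro x hx hy
        simp only [List.mem_map, List.mem_range] at hx
        simp only [List.map_cons, List.map_nil, List.mem_singleton] at hy
        obtain ⟨k, hk, rfl⟩ := hx
        omega
      have hget1 : (PySem.Dict.mk (L s ++ [(((s:Int)+1), [])])).getD ((s:Int)+1) [] = [] :=
        PySem.Dict.getD_of_mem_items _ (by simp) hnodup1 []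
      have hcont1 : (PySem.Dict.mk (L s ++ [(((s:Int)+1), [])])).contains ((s:Int)+1) = true := by
        rw [PySem.Dict.contains_mk]
        simp
      simp only [pvAsize, hcont', Bool.false_eq_true, if_false, hins, PySem.Dict.modify, hget1]
      have hitems := PySem.Dict.items_insert_of_contains (PySem.Dict.mk (L s ++ [(((s:Int)+1), [])]))
        ([] ++ [((i - ((s:Int)+1) + 1, j - ((s:Int)+1) + 1), (i, j))]) hcont1
      refine Prod.ext ?_ (by push_cast; ring)
      apply PySem.Dict.ext
      rw [hitems]
      show ((List.range (M ⊔ s)).map (f s) ++ [(((s:Int)+1), [])]).map _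
          = (List.range (M ⊔ (s+1))).map (f (s+1))
      rw [List.map_append, List.map_map, hMs, hMs1, List.range_succ, List.map_append]
      congr 1
      · apply List.map_congr_left
        intro k hk
        simp only [List.mem_range] at hk
        have hne : ¬ (((k:Int)+1) == ((s:Int)+1)) = true := by
          simp only [beq_iff_eq]
          omega
        simp only [Function.comp, hf, hne, if_false, Bool.false_eq_true]
        by_cases hk1 : k+1 ≤ s
        · rw [if_pos hk1, if_pos (by omega : k+1 ≤ s+1)]
        · rw [if_neg hk1, if_neg (by omega : ¬ k+1 ≤ s+1)]
      · have hentr : pvEntr ((s:Int)+1) C = [] := by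
          apply pvEntr_nil_of_gt
          intro c hc
          have := hM c hc
          omega
        simp [hf, hentr, pvEnt]
  have h0 : (PySem.Dict.mk (pvSizes M C), t)
      = ((fun (s : Nat) => ((PySem.Dict.mk ((List.range (M ⊔ s)).map (fun (k : Nat) =>
         (((k:Int)+1), pvEntr ((k:Int)+1) C ++ (if k+1 ≤ s then [pvEnt i j ((k:Int)+1)] else []))))),
         t + (s:Int))) : Nat → _) 0 := by
    simp [pvSizes]
  rw [h0]
  exact pv_foldl_range_state (fun dt (k : Nat) => pvAsize i j dt ((k:Int)+1))
    (fun (s : Nat) => ((PySem.Dict.mk ((List.range (M ⊔ s)).map (fun (k : Nat) =>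
       (((k:Int)+1), pvEntr ((k:Int)+1) C ++ (if k+1 ≤ s then [pvEnt i j ((k:Int)+1)] else []))))),
       t + (s:Int))) v hstep

theorem pvDictOf_snoc (C : List (Int × Int × Int)) (i j v : Int) (hv : 0 ≤ v) (t : Int) :
    (PySem.List.pyRange 1 (v+1)).foldl (pvAsize i j) (pvDictOf C, t)
    = (pvDictOf (C ++ [(i, j, v)]), t + v) := by
  have hM : ∀ c ∈ C, c.2.2 ≤ ((pvVmax C).toNat : Int) := by
    intro c hc
    have h1 := pvVmax_bound C c hc
    have h0 := pvVmax_nonneg C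
    omega
  have hv' : v = ((v.toNat : Nat) : Int) := (Int.toNat_of_nonneg hv).symm
  rw [pvDictOf, hv', pvAsize_fold (pvVmax C).toNat v.toNat C i j t hM]
  refine Prod.ext ?_ (by simp)
  rw [pvDictOf]
  show PySem.Dict.mk _ = PySem.Dict.mk _
  apply congrArg
  have hmax : (pvVmax (C ++ [(i, j, ((v.toNat : Nat) : Int))])).toNat
      = (pvVmax C).toNat ⊔ v.toNat := by
    rw [pvVmax_append_singleton]
    have h0 := pvVmax_nonneg C
    rcases le_total (pvVmax C) (((v.toNat : Nat)) : Int) with h | h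
    · rw [max_eq_right h, Nat.max_eq_right (by omega)]; omega
    · rw [max_eq_left h, Nat.max_eq_left (by omega)]
  rw [pvSizes, hmax]
  symm
  apply List.map_congr_left
  intro k hk
  have hentr : pvEntr ((k:Int)+1) (C ++ [(i, j, ((v.toNat : Nat) : Int))])
      = pvEntr ((k:Int)+1) C ++ (if k+1 ≤ v.toNat then [pvEnt i j ((k:Int)+1)] else []) := by
    rw [pvEntr_append]
    congr 1
    rw [pvEntr_singleton]
    by_cases hkv : k+1 ≤ v.toNat
    · rw [if_pos hkv, if_pos (by omega : ((k:Int)+1 ≤ ((v.toNat : Nat) : Int)))]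
    · rw [if_neg hkv, if_neg (by omega : ¬ ((k:Int)+1 ≤ ((v.toNat : Nat) : Int)))]
  rw [hentr]

theorem pv_getD_mid {α : Type} (A B : List α) (x d : α) : (A ++ (x :: B)).getD A.length d = x := by
  induction A with
  | nil => rfl
  | cons a A ih => simpa using ih

theorem pv_set_mid {α : Type} (A B : List α) (x y : α) :
    (A ++ (x :: B)).set A.length y = A ++ (y :: B) := by
  induction A with
  | nil => rfl
  | cons a A ih => simpa using ih

theorem pv_getD_map_range {α : Type} (f : Nat → α) (g i : Nat) (d : α) (h : i < g) :
    ((List.range g).map f).getD i d = f i := by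
  rw [List.getD_eq_getElem _ _ (by simpa using h)]
  simp

theorem pvRowSt_getD (matrix : List (List Int)) (n k j j' : Nat) (h : j' < j) :
    (pvRowSt matrix n k j).getD j' 0 = pvVal matrix k j' := by
  rw [pvRowSt, List.getD_append _ _ _ _ (by simpa using h)]
  exact pv_getD_map_range _ _ _ _ h

theorem pvDpMid_row (matrix : List (List Int)) (m n k j : Nat) :
    (pvDpMid matrix m n k j).getD k [] = pvRowSt matrix n k j := by
  rw [pvDpMid]
  have := pv_getD_mid ((List.range k).map (pvRowT matrix n))
    (List.replicate (m-k-1) (List.replicate n 0)) (pvRowSt matrix n k j) ([] : List Int)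
  simpa using this

-- reading the partially-filled dp table
theorem pvDpMid_get_lt (matrix : List (List Int)) (m n k j i' j' : Nat)
    (hi : i' < k) (hj : j' < n) :
    PySem.List.pyGetD (PySem.List.pyGetD (pvDpMid matrix m n k j) (i':Int) []) (j':Int) 0
    = pvVal matrix i' j' := by
  rw [PySem.List.pyGetD_natCast, PySem.List.pyGetD_natCast, pvDpMid]
  rw [List.getD_append _ _ _ _ (by simpa using hi), pv_getD_map_range _ _ _ _ hi]
  rw [pvRowT, pv_getD_map_range _ _ _ _ hj]

theorem pvDpMid_get_cur (matrix : List (List Int)) (m n k j j' : Nat)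
    (hj' : j' < j) (hj : j ≤ n) :
    PySem.List.pyGetD (PySem.List.pyGetD (pvDpMid matrix m n k j) (k:Int) []) (j':Int) 0
    = pvVal matrix k j' := by
  rw [PySem.List.pyGetD_natCast, PySem.List.pyGetD_natCast, pvDpMid_row]
  exact pvRowSt_getD _ _ _ _ _ hj'

theorem pvSetCell_dpMid (matrix : List (List Int)) (m n k j : Nat) (hj : j < n) :
    pvSetCell (pvDpMid matrix m n k j) (k:Int) (j:Int) (pvVal matrix k j)
    = pvDpMid matrix m n k (j+1) := by
  rw [pvSetCell]
  simp only [Int.toNat_natCast]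
  rw [pvDpMid_row]
  have hrow : (pvRowSt matrix n k j).set j (pvVal matrix k j) = pvRowSt matrix n k (j+1) := by
    rw [pvRowSt, pvRowSt]
    have hrep : List.replicate (n-j) (0:Int) = 0 :: List.replicate (n-(j+1)) 0 := by
      rw [show n-j = (n-(j+1))+1 from by omega, List.replicate_succ]
    rw [hrep]
    have hset := pv_set_mid ((List.range j).map (pvVal matrix k))
      (List.replicate (n-(j+1)) (0:Int)) 0 (pvVal matrix k j)
    simp only [List.length_map, List.length_range] at hset
    rw [hset, List.range_succ, List.map_append]
    simp
  rw [hrow, pvDpMid, pvDpMid]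
  have hset := pv_set_mid ((List.range k).map (pvRowT matrix n))
    (List.replicate (m-k-1) (List.replicate n 0)) (pvRowSt matrix n k j) (pvRowSt matrix n k (j+1))
  simp only [List.length_map, List.length_range] at hset
  exact hset

theorem pvDpMid_succ_of_zero (matrix : List (List Int)) (m n k j : Nat) (hj : j < n)
    (h : pvVal matrix k j = 0) :
    pvDpMid matrix m n k (j+1) = pvDpMid matrix m n k j := by
  rw [pvDpMid, pvDpMid]
  have : pvRowSt matrix n k (j+1) = pvRowSt matrix n k j := by
    rw [pvRowSt, pvRowSt, List.range_succ, List.map_append]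
    have hrep : List.replicate (n-j) (0:Int) = 0 :: List.replicate (n-(j+1)) 0 := by
      rw [show n-j = (n-(j+1))+1 from by omega, List.replicate_succ]
    rw [hrep]
    simp [h]
  rw [this]

theorem pvCellsMid_zero (matrix : List (List Int)) (n k : Nat) :
    pvCellsMid matrix n k 0 = pvCells matrix k n := by
  simp [pvCellsMid]

theorem pvCellsMid_n (matrix : List (List Int)) (n k : Nat) :
    pvCellsMid matrix n k n = pvCells matrix (k+1) n := by
  rw [pvCellsMid, pvCells, pvCells, List.range_succ, List.flatMap_append]
  simp [pvCellsRow]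

theorem pvDictOf_snoc_zero (C : List (Int × Int × Int)) (i j : Int) :
    pvDictOf (C ++ [(i, j, 0)]) = pvDictOf C := by
  rw [pvDictOf, pvDictOf]
  have hmax : pvVmax (C ++ [(i, j, 0)]) = pvVmax C := by
    rw [pvVmax_append_singleton]
    exact max_eq_left (pvVmax_nonneg C)
  rw [pvSizes, pvSizes, hmax]
  apply congrArg
  apply List.map_congr_left
  intro k hk
  rw [pvEntr_append, pvEntr_singleton, if_neg (by omega), List.append_nil]

theorem pvSumv_append_singleton (C : List (Int × Int × Int)) (c : Int × Int × Int) :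
    pvSumv (C ++ [c]) = pvSumv C + c.2.2 := by
  simp [pvSumv]

-- one cell of A's double loop preserves the invariant
theorem pvAcell_step (matrix : List (List Int)) (m n k j : Nat) (hk : k < m) (hj : j < n) :
    pvAcell matrix (k:Int) (j:Int)
      (pvDpMid matrix m n k j, pvDictOf (pvCellsMid matrix n k j), pvSumv (pvCellsMid matrix n k j))
    = (pvDpMid matrix m n k (j+1), pvDictOf (pvCellsMid matrix n k (j+1)),
       pvSumv (pvCellsMid matrix n k (j+1))) := by
  have hmread : PySem.List.pyGetD (PySem.List.pyGetD matrix (k:Int) []) (j:Int) 0 = pvGetM matrix k j := by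
    rw [PySem.List.pyGetD_natCast, PySem.List.pyGetD_natCast]; rfl
  by_cases h1 : pvGetM matrix k j = 1
  · have hv : (if (k:Int) == 0 || (j:Int) == 0 then (1:Int)
        else min (min (PySem.List.pyGetD (PySem.List.pyGetD (pvDpMid matrix m n k j) ((k:Int)-1) []) (j:Int) 0)
                      (PySem.List.pyGetD (PySem.List.pyGetD (pvDpMid matrix m n k j) (k:Int) []) ((j:Int)-1) 0))
                 (PySem.List.pyGetD (PySem.List.pyGetD (pvDpMid matrix m n k j) ((k:Int)-1) []) ((j:Int)-1) 0) + 1)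
        = pvVal matrix k j := by
      by_cases hk0 : k = 0
      · subst hk0; rw [pvVal]; simp [pvGetM] at h1; simp [pvVal, pvGetM, h1]
      by_cases hj0 : j = 0
      · subst hj0; rw [pvVal]; simp [pvGetM] at h1; simp [pvVal, pvGetM, h1, hk0]
      · have e1 : ((k:Int)-1) = ((k-1 : Nat) : Int) := by omega
        have e2 : ((j:Int)-1) = ((j-1 : Nat) : Int) := by omega
        rw [e1, e2,
          pvDpMid_get_lt matrix m n k j (k-1) j (by omega) hj,
          pvDpMid_get_cur matrix m n k j (j-1) (by omega) (by omega),
          pvDpMid_get_lt matrix m n k j (k-1) (j-1) (by omega) (by omega)]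
        conv_rhs => rw [pvVal]
        have hc1 : (((k:Int)) == 0 || ((j:Int)) == 0) = false := by
          simp [hk0, hj0]
        have hc2 : ((k == 0 || j == 0) : Bool) = false := by
          simp [hk0, hj0]
        rw [hc1, hc2]
        simp [h1]
    have hg : (PySem.List.pyGetD (PySem.List.pyGetD matrix (k:Int) []) (j:Int) 0 == 1) = true := by
      rw [hmread]; simp [h1]
    simp only [pvAcell, hg, if_true, hv]
    rw [pvSetCell_dpMid matrix m n k j hj]
    rw [pvDictOf_snoc (pvCellsMid matrix n k j) (k:Int) (j:Int) (pvVal matrix k j)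
      (pvVal_nonneg matrix k j) (pvSumv (pvCellsMid matrix n k j))]
    have hC : pvCellsMid matrix n k j ++ [((k:Int), ((j:Int), pvVal matrix k j))]
        = pvCellsMid matrix n k (j+1) := by
      rw [pvCellsMid, pvCellsMid, List.range_succ, List.map_append]
      simp
    rw [hC]
    refine Prod.ext rfl (Prod.ext rfl ?_)
    rw [← hC, pvSumv_append_singleton]
  · have hg : (PySem.List.pyGetD (PySem.List.pyGetD matrix (k:Int) []) (j:Int) 0 == 1) = false := by
      rw [hmread]; simp [h1]
    simp only [pvAcell, hg, Bool.false_eq_true, if_false]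
    have hz := pvVal_of_ne_one matrix k j h1
    have hC : pvCellsMid matrix n k (j+1)
        = pvCellsMid matrix n k j ++ [((k:Int), ((j:Int), (0:Int)))] := by
      rw [pvCellsMid, pvCellsMid, List.range_succ, List.map_append, List.append_assoc]
      simp [hz]
    rw [pvDpMid_succ_of_zero matrix m n k j hj hz, hC, pvDictOf_snoc_zero, pvSumv_append_singleton]
    simp

-- A's whole double loop
theorem pvA_loop (matrix : List (List Int)) (m n : Nat)
    (hm : m = matrix.length) (hn : n = (matrix.headD []).length) (hm0 : 0 < m) :
    ((PySem.List.pyRange 0 (m:Int)).foldl (fun st i =>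
        (PySem.List.pyRange 0 (n:Int)).foldl (fun st j => pvAcell matrix i j st) st)
      (List.replicate m (List.replicate n (0:Int)),
       (PySem.Dict.empty : PySem.Dict Int (List ((Int × Int) × (Int × Int)))), (0:Int)))
    = ((List.range m).map (pvRowT matrix n), pvDictOf (pvCells matrix m n),
       pvSumv (pvCells matrix m n)) := by
  rw [PySem.List.pyRange_zero_natCast n, PySem.List.pyRange_zero_natCast m, List.foldl_map]
  have hstep : ∀ k, k < m →
      (fun st (k : Nat) => ((List.range n).map (fun (j : Nat) => (j : Int))).foldl
          (fun st j => pvAcell matrix (k:Int) j st) st)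
        ((fun (k : Nat) => ((List.range k).map (pvRowT matrix n)
            ++ List.replicate (m-k) (List.replicate n (0:Int)),
          pvDictOf (pvCells matrix k n), pvSumv (pvCells matrix k n))) k) k
      = ((fun (k : Nat) => ((List.range k).map (pvRowT matrix n)
            ++ List.replicate (m-k) (List.replicate n (0:Int)),
          pvDictOf (pvCells matrix k n), pvSumv (pvCells matrix k n))) (k+1)) := by
    intro k hk
    show ((List.range n).map (fun (j : Nat) => (j : Int))).foldl
        (fun st j => pvAcell matrix (k:Int) j st)
        ((List.range k).map (pvRowT matrix n) ++ List.replicate (m-k) (List.replicate n (0:Int)),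
         pvDictOf (pvCells matrix k n), pvSumv (pvCells matrix k n))
      = ((List.range (k+1)).map (pvRowT matrix n)
           ++ List.replicate (m-(k+1)) (List.replicate n (0:Int)),
         pvDictOf (pvCells matrix (k+1) n), pvSumv (pvCells matrix (k+1) n))
    rw [List.foldl_map]
    have h0 : ((List.range k).map (pvRowT matrix n)
          ++ List.replicate (m-k) (List.replicate n (0:Int)),
        pvDictOf (pvCells matrix k n), pvSumv (pvCells matrix k n))
        = ((fun (j : Nat) => (pvDpMid matrix m n k j, pvDictOf (pvCellsMid matrix n k j),
            pvSumv (pvCellsMid matrix n k j))) : Nat → _) 0 := by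
      have hrep : List.replicate (m-k) (List.replicate n (0:Int))
          = List.replicate n 0 :: List.replicate (m-k-1) (List.replicate n 0) := by
        obtain ⟨q, hq⟩ : ∃ q, m-k = q+1 := ⟨m-k-1, by omega⟩
        rw [hq, List.replicate_succ]
        congr 2
        all_goals omega
      have hrow0 : pvRowSt matrix n k 0 = List.replicate n (0:Int) := by
        simp [pvRowSt]
      simp only [pvCellsMid_zero, pvDpMid, hrow0, hrep]
    rw [h0]
    have hs := pv_foldl_range_state (fun st (j : Nat) => pvAcell matrix (k:Int) (j:Int) st)
      (fun (j : Nat) => (pvDpMid matrix m n k j, pvDictOf (pvCellsMid matrix n k j),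
        pvSumv (pvCellsMid matrix n k j))) n
      (fun j hj => pvAcell_step matrix m n k j hk hj)
    rw [hs]
    have hrown : pvRowSt matrix n k n = pvRowT matrix n k := by
      simp [pvRowSt, pvRowT]
    simp only [pvDpMid, hrown, pvCellsMid_n]
    have hd : (List.range (k+1)).map (pvRowT matrix n)
          ++ List.replicate (m-(k+1)) (List.replicate n (0:Int))
        = (List.range k).map (pvRowT matrix n)
          ++ (pvRowT matrix n k :: List.replicate (m-k-1) (List.replicate n 0)) := by
      rw [List.range_succ, List.map_append, List.append_assoc]
      simp [show m-(k+1) = m-k-1 from by omega]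
    rw [hd]
  have h00 : ((List.replicate m (List.replicate n (0:Int))),
      (PySem.Dict.empty : PySem.Dict Int (List ((Int × Int) × (Int × Int)))), (0:Int))
      = ((fun (k : Nat) => ((List.range k).map (pvRowT matrix n)
            ++ List.replicate (m-k) (List.replicate n (0:Int)),
          pvDictOf (pvCells matrix k n), pvSumv (pvCells matrix k n))) : Nat → _) 0 := by
    simp only [List.range_zero, List.map_nil, List.nil_append, Nat.sub_zero]
    refine Prod.ext rfl (Prod.ext ?_ ?_)
    · show PySem.Dict.empty = pvDictOf (pvCells matrix 0 n)
      simp [pvDictOf, pvCells, pvSizes, pvVmax]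
      rfl
    · show (0:Int) = pvSumv (pvCells matrix 0 n)
      simp [pvSumv, pvCells]
  rw [h00, pv_foldl_range_state (fun st (k : Nat) => ((List.range n).map (fun (j : Nat) => (j : Int))).foldl
      (fun st j => pvAcell matrix (k:Int) j st) st)
    (fun (k : Nat) => ((List.range k).map (pvRowT matrix n)
        ++ List.replicate (m-k) (List.replicate n (0:Int)),
      pvDictOf (pvCells matrix k n), pvSumv (pvCells matrix k n))) m hstep]
  simp

theorem pvEntr_flatMap {α : Type} (s : Int) (l : List α) (f : α → List (Int × Int × Int)) :
    pvEntr s (l.flatMap f) = l.flatMap (fun x => pvEntr s (f x)) := by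
  induction l with
  | nil => rfl
  | cons a l ih => rw [List.flatMap_cons, pvEntr_append, ih, List.flatMap_cons]

theorem pvTab_read (matrix : List (List Int)) (m n i j : Nat) (hi : i < m) (hj : j < n) :
    PySem.List.pyGetD (PySem.List.pyGetD (pvTab matrix m n) (i:Int) []) (j:Int) 0
    = pvVal matrix i j := by
  rw [PySem.List.pyGetD_natCast, PySem.List.pyGetD_natCast, pvTab,
    pv_getD_map_range _ _ _ _ hi, pvRowT, pv_getD_map_range _ _ _ _ hj]

-- B's dp build
theorem pvB_build (matrix : List (List Int)) (n : Nat) (hn : n = (matrix.headD []).length) :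
    (matrix.foldl (fun st row => let cur := pvBrow (n:Int) st row; (st.1 ++ [cur], cur))
      (([] : List (List Int)), List.replicate (matrix.headD []).length (0:Int))).1
    = pvTab matrix matrix.length n := by
  have hrow : ∀ k, k < matrix.length →
      pvBrow (n:Int) ((List.range k).map (pvRowT matrix n),
        if k = 0 then List.replicate n (0:Int) else pvRowT matrix n (k-1)) (matrix.getD k [])
      = pvRowT matrix n k := by
    intro k hk
    rw [pvBrow, PySem.List.pyRange_zero_natCast n]
    refine (pv_foldl_range_cast_state' _
      (fun (j : Nat) => (List.range j).map (pvVal matrix k)) n [] (by simp) ?_).trans (by rfl)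
    intro j hj
    beta_reduce
    rw [List.range_succ, List.map_append]
    apply congrArg
    have hread : PySem.List.pyGetD (matrix.getD k []) (j:Int) 0 = pvGetM matrix k j := by
      rw [PySem.List.pyGetD_natCast]
      rfl
    simp only [List.map_cons, List.map_nil, hread]
    apply congrArg (fun x => [x])
    by_cases h1 : pvGetM matrix k j = 1
    · rw [if_pos (by simp [h1])]
      have h1' : (matrix.getD k []).getD j 0 = 1 := h1
      by_cases hk0 : k = 0
      · subst hk0
        rw [if_pos (by simp)]
        rw [pvVal]
        simp only [pvGetM, h1']
        simp
      by_cases hj0 : j = 0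
      · subst hj0
        rw [if_pos (by simp)]
        rw [pvVal]
        simp only [pvGetM, h1']
        simp [hk0]
      · rw [if_neg (by simp [hk0, hj0])]
        have e2 : ((j:Int)-1) = ((j-1 : Nat) : Int) := by omega
        rw [if_neg hk0, e2]
        rw [pvRowT, PySem.List.pyGetD_natCast, PySem.List.pyGetD_natCast,
          PySem.List.pyGetD_natCast]
        rw [pv_getD_map_range _ _ _ _ hj, pv_getD_map_range _ _ _ _ (by omega : j-1 < n),
          pv_getD_map_range _ _ _ _ (by omega : j-1 < j)]
        conv_rhs => rw [pvVal]
        rw [if_pos (by simp only [pvGetM, h1', beq_self_eq_true]),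
          if_neg (by simp [hk0, hj0])]
        ring
    · rw [if_neg (by simp [h1])]
      rw [pvVal_of_ne_one matrix k j h1]
  have key : ∀ q k, k ≤ matrix.length → matrix.length - k = q →
      ((matrix.drop k).foldl (fun st row => let cur := pvBrow (n:Int) st row; (st.1 ++ [cur], cur))
        ((List.range k).map (pvRowT matrix n),
         if k = 0 then List.replicate n (0:Int) else pvRowT matrix n (k-1)))
      = ((List.range matrix.length).map (pvRowT matrix n),
         if matrix.length = 0 then List.replicate n (0:Int)
         else pvRowT matrix n (matrix.length - 1)) := by
    intro q
    induction q with
    | zero =>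
      intro k hk hq
      have : k = matrix.length := by omega
      subst this
      rw [List.drop_length]
      rfl
    | succ q ih =>
      intro k hk hq
      have hklt : k < matrix.length := by omega
      rw [List.drop_eq_getElem_cons hklt, List.foldl_cons]
      have hgd : matrix[k] = matrix.getD k [] := by
        rw [List.getD_eq_getElem?_getD, List.getElem?_eq_getElem hklt]
        rfl
      have hst : (((List.range k).map (pvRowT matrix n) ++ [pvBrow (n:Int)
            ((List.range k).map (pvRowT matrix n),
             if k = 0 then List.replicate n (0:Int) else pvRowT matrix n (k-1)) (matrix[k])],
          pvBrow (n:Int) ((List.range k).map (pvRowT matrix n),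
             if k = 0 then List.replicate n (0:Int) else pvRowT matrix n (k-1)) (matrix[k])))
          = ((List.range (k+1)).map (pvRowT matrix n),
             if (k+1) = 0 then List.replicate n (0:Int) else pvRowT matrix n ((k+1)-1)) := by
        rw [hgd, hrow k hklt, List.range_succ, List.map_append]
        rfl
      show (matrix.drop (k+1)).foldl _ _ = _
      rw [hst]
      exact ih (k+1) (by omega) (by omega)
  have h00 := key matrix.length 0 (by omega) (by omega)
  rw [List.drop_zero] at h00
  have : ((List.range 0).map (pvRowT matrix n),
      if 0 = 0 then List.replicate n (0:Int) else pvRowT matrix n (0-1))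
      = (([] : List (List Int)), List.replicate (matrix.headD []).length (0:Int)) := by
    rw [hn]
    rfl
  rw [this] at h00
  rw [h00, pvTab]

theorem pvTab_flatten_values (matrix : List (List Int)) (m n : Nat) :
    (pvTab matrix m n).flatten = (pvCells matrix m n).map (fun c => c.2.2) := by
  rw [pvTab, pvCells, List.map_flatMap, ← List.flatMap_def]
  apply List.flatMap_congr
  intro i _
  simp [pvCellsRow, pvRowT, List.map_map]

theorem pv_maxD_id_nonneg (xs : List Int) (h : ∀ x ∈ xs, 0 ≤ x) :
    PySem.List.maxD xs (fun v => v) 0 = xs.foldl max 0 := by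
  cases xs with
  | nil => rfl
  | cons x t =>
    rw [PySem.List.maxD, PySem.List.max?_id_cons, Option.getD_some, List.foldl_cons]
    congr 1
    exact (max_eq_right (h x (by simp))).symm

theorem pvBsizes_eq_entr (matrix : List (List Int)) (m n : Nat) (s : Int) :
    pvBsizes (pvTab matrix m n) (n:Int) s = pvEntr s (pvCells matrix m n) := by
  rw [pvBsizes]
  have hlen : ((pvTab matrix m n).length : Int) = ((m : Nat) : Int) := by simp [pvTab]
  rw [hlen, PySem.List.pyRange_zero_natCast m]
  have hinner : ∀ (lst : List ((Int × Int) × (Int × Int))) (i : Int),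
      (PySem.List.pyRange 0 (n:Int)).foldl (fun lst j =>
        if s ≤ PySem.List.pyGetD (PySem.List.pyGetD (pvTab matrix m n) i []) j 0 then
          lst ++ [((i - s + 1, j - s + 1), (i, j))] else lst) lst
      = lst ++ ((PySem.List.pyRange 0 (n:Int)).filter (fun j =>
          decide (s ≤ PySem.List.pyGetD (PySem.List.pyGetD (pvTab matrix m n) i []) j 0))).map
          (fun j => ((i - s + 1, j - s + 1), (i, j))) := by
    intro lst i
    exact PySem.List.foldl_append_ite _ _ _ _
  have houter : ((List.range m).map (fun (k : Nat) => (k:Int))).foldl (fun lst i =>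
      (PySem.List.pyRange 0 (n:Int)).foldl (fun lst j =>
        if s ≤ PySem.List.pyGetD (PySem.List.pyGetD (pvTab matrix m n) i []) j 0 then
          lst ++ [((i - s + 1, j - s + 1), (i, j))] else lst) lst) []
      = ((List.range m).map (fun (k : Nat) => (k:Int))).foldl (fun lst i => lst ++
        ((PySem.List.pyRange 0 (n:Int)).filter (fun j =>
          decide (s ≤ PySem.List.pyGetD (PySem.List.pyGetD (pvTab matrix m n) i []) j 0))).map
          (fun j => ((i - s + 1, j - s + 1), (i, j)))) [] := by
    apply PySem.List.foldl_congr_mem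
    intro acc x _
    exact hinner acc x
  rw [houter, PySem.List.foldl_append_eq_flatMap, List.nil_append, List.flatMap_map]
  rw [pvCells, pvEntr_flatMap]
  apply List.flatMap_congr
  intro i hi
  simp only [List.mem_range] at hi
  rw [PySem.List.pyRange_zero_natCast n, List.filter_map, List.map_map]
  rw [pvCellsRow, pvEntr, List.filter_map, List.map_map]
  have hfilter : (List.range n).filter ((fun j => decide (s ≤ PySem.List.pyGetD
        (PySem.List.pyGetD (pvTab matrix m n) (i:Int) []) j 0)) ∘ (fun (k : Nat) => (k:Int)))
      = (List.range n).filter ((fun c => decide (s ≤ c.2.2))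
        ∘ (fun (j : Nat) => ((i:Int), ((j:Int), pvVal matrix i j)))) := by
    apply List.filter_congr
    intro j hj
    simp only [List.mem_range] at hj
    simp only [Function.comp]
    rw [pvTab_read matrix m n i j hi hj]
  rw [hfilter]
  apply List.map_congr_left
  intro j _
  rfl

theorem pvB_dict (matrix : List (List Int)) (m n g : Nat) :
    ((PySem.List.pyRange 1 ((g:Int)+1)).foldl
        (fun d s => d.insert s (pvBsizes (pvTab matrix m n) (n:Int) s))
        ((PySem.Dict.empty : PySem.Dict Int (List ((Int × Int) × (Int × Int)))))).items
    = pvSizes g (pvCells matrix m n) := by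
  rw [pv_range_one_cast]
  rw [PySem.Dict.items_foldl_insert_fresh ((List.range g).map (fun (k : Nat) => ((k:Int)+1)))
    (fun s => s) (fun s => pvBsizes (pvTab matrix m n) (n:Int) s) PySem.Dict.empty
    (by intro a _; simp)
    (by
      simp only [List.map_id_fun', List.map_id]
      refine List.Nodup.map ?_ List.nodup_range
      intro a b hab
      simpa using hab)]
  have he : (PySem.Dict.empty : PySem.Dict Int (List ((Int × Int) × (Int × Int)))).items = [] := rfl
  rw [he, List.nil_append, List.map_map, pvSizes]
  apply List.map_congr_left
  intro k _
  simp only [Function.comp]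
  rw [pvBsizes_eq_entr]

-- ===== VERDICT (by name: the statement is the Claim_ definition above) =====
theorem count_squares_all_positions_spec : Claim_equal_count_squares_all_positions := by
  intro matrix _ _
  unfold Spec_count_squares_all_positions
  rw [count_squares_all_positions, count_squares_all_positions_alt]
  by_cases hempty : matrix = [] ∨ matrix.headD [] = []
  · rw [if_pos hempty, if_pos hempty]
  · rw [if_neg hempty, if_neg hempty]
    push_neg at hempty
    have hm0 : 0 < matrix.length := by
      cases matrix with
      | nil => exact absurd rfl hempty.1
      | cons a l => simp
    have hA := pvA_loop matrix matrix.length (matrix.headD []).length rfl rfl hm0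
    have hB := pvB_build matrix (matrix.headD []).length rfl
    simp only [hA, hB]
    have htotal : ((pvTab matrix matrix.length (matrix.headD []).length).map
          (fun r => r.sum)).sum
        = pvSumv (pvCells matrix matrix.length (matrix.headD []).length) := by
      rw [pvSumv, ← pvTab_flatten_values, List.sum_flatten]
    have hflat_nonneg : ∀ x ∈ (pvTab matrix matrix.length (matrix.headD []).length).flatten,
        (0:Int) ≤ x := by
      intro x hx
      rw [pvTab_flatten_values] at hx
      obtain ⟨c, hc, rfl⟩ := List.mem_map.mp hx
      obtain ⟨i, _, hci⟩ := List.mem_flatMap.mp hc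
      obtain ⟨j, _, rfl⟩ := List.mem_map.mp hci
      exact pvVal_nonneg matrix i j
    have hmax : PySem.List.maxD
          (pvTab matrix matrix.length (matrix.headD []).length).flatten (fun v => v) 0
        = ((pvVmax (pvCells matrix matrix.length (matrix.headD []).length)).toNat : Int) := by
      rw [pv_maxD_id_nonneg _ hflat_nonneg, pvTab_flatten_values]
      rw [Int.toNat_of_nonneg (pvVmax_nonneg _)]
      rfl
    rw [hmax, htotal]
    have hdict := pvB_dict matrix matrix.length (matrix.headD []).length
      ((pvVmax (pvCells matrix matrix.length (matrix.headD []).length)).toNat)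
    rw [hdict]
    rfl
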